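-- pv_equiv track=rewrite | github.com/zakiehrmn/contactdon | UserInterface.py | params_contact_dict
-- ===== SOURCE A (Python) =====
-- def params_contact_dict(splitCommand):
--     paramsDict = {}
--     fName, lName, emailAddress, phoneNumber = "", "", "", ""
--     for index in range(len(splitCommand)):
--         if(splitCommand[index] == "-f"):
--             fName = splitCommand[index+1]
--         if(splitCommand[index] == "-l"):
--             lName = splitCommand[index+1]
--         if(splitCommand[index] == "-e"):
--             emailAddress = splitCommand[index+1]
--         if(splitCommand[index] == "-p"):
--             phoneNumber = splitCommand[index+1]
--     if(fName != ""):
--         paramsDict["first name"] = fName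
--     if(lName != ""):
--         paramsDict.update({"last name" : lName})
--     if(emailAddress != ""):
--         paramsDict.update({"email address" : emailAddress})
--     if(phoneNumber != ""):
--         paramsDict.update({"phone number" : phoneNumber})
--     return paramsDict
-- ===== SOURCE B (Python) =====
-- def params_contact_dict(splitCommand):
--     result = {}
--     for flag, key in (("-f", "first name"), ("-l", "last name"),
--                       ("-e", "email address"), ("-p", "phone number")):
--         value = ""
--         for i in range(len(splitCommand)):
--             if splitCommand[i] == flag:
--                 value = splitCommand[i + 1]
--         if value != "":
--             result[key] = value
--     return result
-- ===== Notes on version B (the rewrite author's own statement) =====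
-- stated objective: alternative
-- what changed: B replaces A's single pass maintaining four parallel variables with an outer loop over the four (flag, key) pairs, each running its own scan for the last occurrence and inserting directly into the result.
import Mathlib
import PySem

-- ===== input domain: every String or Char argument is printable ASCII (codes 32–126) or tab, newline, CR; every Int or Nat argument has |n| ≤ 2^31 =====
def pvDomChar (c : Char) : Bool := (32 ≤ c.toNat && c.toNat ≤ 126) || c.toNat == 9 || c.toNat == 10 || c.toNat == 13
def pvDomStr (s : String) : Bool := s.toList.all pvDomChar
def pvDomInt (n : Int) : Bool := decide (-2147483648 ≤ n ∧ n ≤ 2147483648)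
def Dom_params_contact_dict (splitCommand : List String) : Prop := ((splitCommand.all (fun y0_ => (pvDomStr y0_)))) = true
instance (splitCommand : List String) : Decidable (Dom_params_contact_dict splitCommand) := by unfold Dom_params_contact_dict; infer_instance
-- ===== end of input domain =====

-- B replaces A's single pass with four parallel variables by an outer loop over the
-- four (flag, key) pairs, each running its own last-occurrence scan (alternative decomposition, same cost).


-- ===== PORT A =====
-- single pass: four parallel variables updated by four independent ifs, then the dict is built
def params_contact_dict (splitCommand : List String) : List (String × String) :=
  let st := (List.range splitCommand.length).foldl
    (fun (s : String × String × String × String) index =>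
      let tok := PySem.List.pyGetD splitCommand (Int.ofNat index) ""
      let nxt := PySem.List.pyGetD splitCommand (Int.ofNat index + 1) ""
      (if tok == "-f" then nxt else s.1,
       if tok == "-l" then nxt else s.2.1,
       if tok == "-e" then nxt else s.2.2.1,
       if tok == "-p" then nxt else s.2.2.2))
    ("", "", "", "")
  let d : PySem.Dict String String := PySem.Dict.empty
  let d := if st.1 != "" then PySem.Dict.insert d "first name" st.1 else d
  let d := if st.2.1 != "" then PySem.Dict.insert d "last name" st.2.1 else d
  let d := if st.2.2.1 != "" then PySem.Dict.insert d "email address" st.2.2.1 else d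
  let d := if st.2.2.2 != "" then PySem.Dict.insert d "phone number" st.2.2.2 else d
  d.items

-- ===== PORT B =====
def params_contact_dict_alt (splitCommand : List String) : List (String × String) :=
  ([("-f", "first name"), ("-l", "last name"),
    ("-e", "email address"), ("-p", "phone number")] : List (String × String)).foldl
    (fun (result : PySem.Dict String String) fk =>
      let value := (List.range splitCommand.length).foldl
        (fun v i =>
          if PySem.List.pyGetD splitCommand (Int.ofNat i) "" == fk.1
          then PySem.List.pyGetD splitCommand (Int.ofNat i + 1) "" else v)
        ""
      if value != "" then PySem.Dict.insert result fk.2 value else result)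
    PySem.Dict.empty |>.items

-- ===== PRECONDITION & SPEC =====
-- Pre_ excludes exactly the inputs where both Pythons raise IndexError: a flag as the last token.
def Pre_params_contact_dict (splitCommand : List String) : Prop :=
  splitCommand.getLast? ≠ some "-f" ∧ splitCommand.getLast? ≠ some "-l" ∧
  splitCommand.getLast? ≠ some "-e" ∧ splitCommand.getLast? ≠ some "-p"
instance (splitCommand : List String) : Decidable (Pre_params_contact_dict splitCommand) := by unfold Pre_params_contact_dict; infer_instance
def pvWitness_params_contact_dict : List String := ["-f", "Ann", "-p", "123", "-f", "Bob"]
def Spec_params_contact_dict (splitCommand : List String) (out : List (String × String)) : Prop := out = params_contact_dict_alt splitCommand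
instance (splitCommand : List String) (out : List (String × String)) : Decidable (Spec_params_contact_dict splitCommand out) := by unfold Spec_params_contact_dict; infer_instance

-- ===== CLAIM (what is proved, stated in full; the proofs are below) =====
def Claim_equal_params_contact_dict : Prop := ∀ (splitCommand : List String), Dom_params_contact_dict splitCommand → Pre_params_contact_dict splitCommand → Spec_params_contact_dict splitCommand (params_contact_dict splitCommand)

-- ===== LEMMAS AND PROOFS =====

/-- A's fold updates the four variables independently, so it splits into four
    last-occurrence scans — one per flag, exactly B's inner loops. -/
theorem foldl_flags (sc : List String) (l : List Nat) (a b c d : String) :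
    l.foldl (fun (s : String × String × String × String) index =>
        let tok := PySem.List.pyGetD sc (Int.ofNat index) ""
        let nxt := PySem.List.pyGetD sc (Int.ofNat index + 1) ""
        (if tok == "-f" then nxt else s.1,
         if tok == "-l" then nxt else s.2.1,
         if tok == "-e" then nxt else s.2.2.1,
         if tok == "-p" then nxt else s.2.2.2)) (a, b, c, d)
      = (l.foldl (fun v i => if PySem.List.pyGetD sc (Int.ofNat i) "" == "-f" then PySem.List.pyGetD sc (Int.ofNat i + 1) "" else v) a,
         l.foldl (fun v i => if PySem.List.pyGetD sc (Int.ofNat i) "" == "-l" then PySem.List.pyGetD sc (Int.ofNat i + 1) "" else v) b,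
         l.foldl (fun v i => if PySem.List.pyGetD sc (Int.ofNat i) "" == "-e" then PySem.List.pyGetD sc (Int.ofNat i + 1) "" else v) c,
         l.foldl (fun v i => if PySem.List.pyGetD sc (Int.ofNat i) "" == "-p" then PySem.List.pyGetD sc (Int.ofNat i + 1) "" else v) d) := by
  induction l generalizing a b c d with
  | nil => rfl
  | cons x xs ih => simp only [List.foldl]; exact ih _ _ _ _

theorem params_contact_dict_eq_alt (splitCommand : List String) :
    params_contact_dict splitCommand = params_contact_dict_alt splitCommand := by
  simp only [params_contact_dict, params_contact_dict_alt, List.foldl,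
    foldl_flags splitCommand (List.range splitCommand.length) "" "" "" ""]

-- ===== VERDICT (by name: the statement is the Claim_ definition above) =====
theorem params_contact_dict_spec : Claim_equal_params_contact_dict := by
  intro s _ _
  exact params_contact_dict_eq_alt s
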